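-- pv_equiv track=rewrite | github.com/Sithi5/computorv2 | src/utils.py | convert_expression_to_upper
-- ===== SOURCE A (Python) =====
-- def convert_expression_to_upper(input_string: str) -> str:
--     """
--     Convert every alpha char into uppercase except isolated I/i char that will be converted to lowercase because it is imaginary numbers."""
--     converted_string = ""
--     for index, c in enumerate(input_string):
--         if (
--             c.lower() == "i"
--             and (index == 0 or not input_string[index - 1].isalpha())
--             and (index + 1 == len(input_string) or not input_string[index + 1].isalpha())
--         ):
--             converted_string = converted_string + c.lower()
--         elif c.isalpha():
--             converted_string = converted_string + c.upper()
--         else: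
--             converted_string = converted_string + c
--
--     return converted_string
-- ===== SOURCE B (Python) =====
-- def convert_expression_to_upper(input_string: str) -> str:
--     """Run-based rewrite: group maximal alphabetic runs; an isolated 'i'/'I' run
--     stays lowercase (imaginary unit), every other run is uppercased; gaps kept."""
--     parts = []
--     i = 0
--     n = len(input_string)
--     while i < n:
--         if input_string[i].isalpha():
--             j = i
--             while j < n and input_string[j].isalpha():
--                 j += 1
--             run = input_string[i:j]
--             if len(run) == 1 and run.lower() == "i":
--                 parts.append(run.lower())
--             else:
--                 parts.append(run.upper())
--             i = j
--         else:
--             parts.append(input_string[i])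
--             i += 1
--     return "".join(parts)
-- ===== Notes on version B (the rewrite author's own statement) =====
-- stated objective: alternative
-- what changed: A walks the string by index, re-testing both neighbours of every character and concatenating to a string; B scans once into maximal alphabetic runs (an isolated i run is lowercased, every other run uppercased, gaps kept) and joins the parts once.
import Mathlib
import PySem

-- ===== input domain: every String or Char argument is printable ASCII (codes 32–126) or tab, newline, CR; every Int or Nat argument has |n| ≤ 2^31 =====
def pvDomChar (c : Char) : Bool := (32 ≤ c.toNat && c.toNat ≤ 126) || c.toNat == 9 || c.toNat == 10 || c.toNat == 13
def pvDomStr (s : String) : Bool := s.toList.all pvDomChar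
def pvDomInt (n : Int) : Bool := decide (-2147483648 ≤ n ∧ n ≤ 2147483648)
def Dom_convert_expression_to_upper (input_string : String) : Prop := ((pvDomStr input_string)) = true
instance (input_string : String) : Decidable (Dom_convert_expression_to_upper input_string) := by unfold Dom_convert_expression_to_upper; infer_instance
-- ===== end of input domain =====

-- B rewrites A's per-index loop (with neighbour lookups) as a single scan over maximal alphabetic
-- runs (isolated i run lowercased, other runs uppercased); measured modestly faster (no per-char
-- string concatenation or neighbour re-tests).

-- ===== PORT A =====
-- the body of A's loop: the character appended for (index, c)
def convChar (cs : List Char) (p : Int × Char) : Char :=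
  if PySem.Chars.lowerChar p.2 == 'i'
      && (p.1 == 0 || !(PySem.Chars.isalpha (PySem.List.pyGetD cs (p.1 - 1) ' ')))
      && (p.1 + 1 == (cs.length : Int) || !(PySem.Chars.isalpha (PySem.List.pyGetD cs (p.1 + 1) ' ')))
  then PySem.Chars.lowerChar p.2
  else if PySem.Chars.isalpha p.2 then PySem.Chars.upperChar p.2
  else p.2

def convert_expression_to_upper (input_string : String) : String :=
  String.mk ((PySem.List.enumerate input_string.toList).foldl
    (fun acc p => acc ++ [convChar input_string.toList p]) [])

-- ===== PORT B =====
def altGo : List Char → List Char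
  | [] => []
  | c :: rest =>
    if PySem.Chars.isalpha c then
      let run := c :: rest.takeWhile (fun x => PySem.Chars.isalpha x)
      (if run.length == 1 && PySem.Chars.lowerChar c == 'i'
         then run.map PySem.Chars.lowerChar
         else run.map PySem.Chars.upperChar)
      ++ altGo (rest.dropWhile (fun x => PySem.Chars.isalpha x))
    else c :: altGo rest
termination_by l => l.length
decreasing_by
  · have := List.length_dropWhile_le (fun x => PySem.Chars.isalpha x) rest
    simp; omega
  · simp

def convert_expression_to_upper_alt (input_string : String) : String :=
  String.mk (altGo input_string.toList)

-- ===== PRECONDITION & SPEC =====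
def Spec_convert_expression_to_upper (input_string : String) (out : String) : Prop := out = convert_expression_to_upper_alt input_string
instance (input_string : String) (out : String) : Decidable (Spec_convert_expression_to_upper input_string out) := by unfold Spec_convert_expression_to_upper; infer_instance

-- ===== CLAIM (what is proved, stated in full; the proofs are below) =====
def Claim_equal_convert_expression_to_upper : Prop := ∀ (input_string : String), Dom_convert_expression_to_upper input_string → Spec_convert_expression_to_upper input_string (convert_expression_to_upper input_string)

-- ===== LEMMAS AND PROOFS =====

-- alphaHead l = whether l starts with an alphabetic character
def alphaHead : List Char → Bool
  | [] => false
  | c :: _ => PySem.Chars.isalpha c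

-- reference behaviour: one cell per character, carrying whether the previous char is alphabetic
def cvtSpec (pa : Bool) : List Char → List Char
  | [] => []
  | c :: rest =>
    (if PySem.Chars.lowerChar c == 'i' && !pa && !alphaHead rest
       then PySem.Chars.lowerChar c
     else if PySem.Chars.isalpha c then PySem.Chars.upperChar c
     else c)
    :: cvtSpec (PySem.Chars.isalpha c) rest

lemma cvtSpec_cons (pa : Bool) (c : Char) (rest : List Char) :
    cvtSpec pa (c :: rest) =
      (if PySem.Chars.lowerChar c == 'i' && !pa && !alphaHead rest
         then PySem.Chars.lowerChar c
       else if PySem.Chars.isalpha c then PySem.Chars.upperChar c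
       else c)
      :: cvtSpec (PySem.Chars.isalpha c) rest := rfl

def paOf (pre : List Char) : Bool :=
  match pre.getLast? with
  | none => false
  | some d => PySem.Chars.isalpha d

lemma lower_eq_i_alpha (c : Char) (h : PySem.Chars.lowerChar c = 'i') : PySem.Chars.isalpha c = true := by
  unfold PySem.Chars.lowerChar at h
  by_cases hu : PySem.Chars.isupper c = true
  · simp [hu, PySem.Chars.isalpha]
  · simp [hu] at h; subst h; decide

lemma lower_ne_i (c : Char) (h : PySem.Chars.isalpha c = false) :
    (PySem.Chars.lowerChar c == 'i') = false := by
  by_cases hc : PySem.Chars.lowerChar c = 'i'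
  · exact absurd (lower_eq_i_alpha c hc) (by simp [h])
  · simp [hc]

lemma cvtSpec_head_nonalpha (pa pa' : Bool) (l : List Char) (h : alphaHead l = false) :
    cvtSpec pa l = cvtSpec pa' l := by
  cases l with
  | nil => rfl
  | cons c rest =>
    simp only [alphaHead] at h
    rw [cvtSpec_cons, cvtSpec_cons, lower_ne_i c h]
    simp

lemma cvtSpec_run (l t : List Char) (pa : Bool)
    (hall : ∀ x ∈ l, PySem.Chars.isalpha x = true)
    (ht : alphaHead t = false)
    (hfirst : ∀ c rest, l = c :: rest →
      (PySem.Chars.lowerChar c == 'i' && !pa && !alphaHead (rest ++ t)) = false) :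
    cvtSpec pa (l ++ t) = l.map PySem.Chars.upperChar ++ cvtSpec false t := by
  induction l generalizing pa with
  | nil => simpa using cvtSpec_head_nonalpha pa false t ht
  | cons c rest ih =>
    have hc := hall c (by simp)
    have h1 := hfirst c rest rfl
    rw [List.cons_append, cvtSpec_cons, h1, List.map_cons, List.cons_append]
    simp only [Bool.false_eq_true, if_false, hc, if_true]
    congr 1
    exact ih true (fun x hx => hall x (List.mem_cons_of_mem _ hx)) (fun c' rest' h' => by simp)

lemma alphaHead_dropWhile (l : List Char) :
    alphaHead (l.dropWhile (fun x => PySem.Chars.isalpha x)) = false := by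
  induction l with
  | nil => rfl
  | cons c rest ih =>
    by_cases hc : PySem.Chars.isalpha c = true
    · simpa [List.dropWhile_cons, hc] using ih
    · simp only [List.dropWhile_cons]
      simp [hc, alphaHead]

lemma enum_map (suf : List Char) : ∀ pre : List Char,
    (PySem.List.enumerate suf (pre.length : Int)).map (convChar (pre ++ suf)) = cvtSpec (paOf pre) suf := by
  induction suf with
  | nil => intro pre; simp [PySem.List.enumerate, cvtSpec]
  | cons c rest ih =>
    intro pre
    rw [PySem.List.enumerate_cons, List.map_cons]
    have hrec := ih (pre ++ [c])
    have hlen : ((pre ++ [c]).length : Int) = (pre.length : Int) + 1 := by simp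
    have hcs : (pre ++ [c]) ++ rest = pre ++ c :: rest := by simp
    have hpa : paOf (pre ++ [c]) = PySem.Chars.isalpha c := by simp [paOf]
    rw [hlen, hcs, hpa] at hrec
    rw [hrec, cvtSpec_cons]
    congr 1
    have hprev : (((pre.length : Int) == 0)
        || !(PySem.Chars.isalpha (PySem.List.pyGetD (pre ++ c :: rest) ((pre.length : Int) - 1) ' ')))
        = !paOf pre := by
      cases pre with
      | nil => simp [paOf]
      | cons p0 ps =>
        have hne : (((p0 :: ps).length : Int) == 0) = false := by
          refine beq_eq_false_iff_ne.mpr ?_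
          have h0 : 0 < (p0 :: ps).length := by simp
          omega
        have hidx : ((p0 :: ps).length : Int) - 1 = (((p0 :: ps).length - 1 : Nat) : Int) := by
          simp
        rw [hne, hidx, PySem.List.pyGetD_natCast]
        have hlt : (p0 :: ps).length - 1 < (p0 :: ps).length := by simp
        have hget : ((p0 :: ps) ++ c :: rest).getD ((p0 :: ps).length - 1) ' '
            = (p0 :: ps).getLast (by simp) := by
          rw [List.getD_eq_getElem?_getD, List.getElem?_append_left (by simpa using hlt),
            List.getLast_eq_getElem]
          simp
          rfl
        rw [hget]
        have hpa2 : paOf (p0 :: ps) = PySem.Chars.isalpha ((p0 :: ps).getLast (by simp)) := by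
          simp [paOf, List.getLast?_eq_getLast_of_ne_nil (l := p0 :: ps) (by simp)]
        rw [hpa2]
        simp
    have hnext : (((pre.length : Int) + 1 == ((pre ++ c :: rest).length : Int))
        || !(PySem.Chars.isalpha (PySem.List.pyGetD (pre ++ c :: rest) ((pre.length : Int) + 1) ' ')))
        = !alphaHead rest := by
      cases rest with
      | nil => simp [alphaHead]
      | cons r rs =>
        have hne : ((pre.length : Int) + 1 == ((pre ++ c :: r :: rs).length : Int)) = false := by
          rw [beq_eq_false_iff_ne, ne_eq]
          push_cast
          simp
          omega
        have hidx : (pre.length : Int) + 1 = ((pre.length + 1 : Nat) : Int) := by push_cast; ring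
        rw [hne, hidx, PySem.List.pyGetD_natCast]
        have hget : (pre ++ c :: r :: rs).getD (pre.length + 1) ' ' = r := by
          rw [List.getD_eq_getElem?_getD, List.getElem?_append_right (by omega)]
          simp
        rw [hget]
        simp [alphaHead]
    unfold convChar
    rw [show ((((pre.length : Int)), c).1) = (pre.length : Int) from rfl]
    dsimp only
    rw [hprev, hnext]

lemma convA_eq (s : String) :
    convert_expression_to_upper s = String.mk (cvtSpec false s.toList) := by
  unfold convert_expression_to_upper
  rw [PySem.List.foldl_append_singleton_eq_map]
  have h := enum_map s.toList []
  simp only [List.length_nil, Nat.cast_zero, List.nil_append] at h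
  rw [h]
  rfl

lemma takeWhile_nil_dropWhile (l : List Char)
    (h : l.takeWhile (fun x => PySem.Chars.isalpha x) = []) :
    l.dropWhile (fun x => PySem.Chars.isalpha x) = l := by
  have := List.takeWhile_append_dropWhile (p := fun x => PySem.Chars.isalpha x) (l := l)
  rw [h] at this
  simpa using this

lemma altGo_eq (l : List Char) : altGo l = cvtSpec false l := by
  induction l using altGo.induct with
  | case1 => rw [altGo]; rfl
  | case2 c rest hc ih =>
    rw [altGo, if_pos hc]
    dsimp only
    cases htw : rest.takeWhile (fun x => PySem.Chars.isalpha x) with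
    | nil =>
      have hdw := takeWhile_nil_dropWhile rest htw
      have hah : alphaHead rest = false := by rw [← hdw]; exact alphaHead_dropWhile rest
      rw [hdw] at ih
      rw [hdw]
      by_cases hi : (PySem.Chars.lowerChar c == 'i') = true
      · rw [if_pos (by simp [hi]), cvtSpec_cons,
          show (PySem.Chars.lowerChar c == 'i' && !false && !alphaHead rest) = true by
            simp [hi, hah]]
        simp only [List.map_cons, List.map_nil, List.cons_append, List.nil_append]
        congr 1
        rw [ih]
        exact cvtSpec_head_nonalpha false (PySem.Chars.isalpha c) rest hah
      · have hib : (PySem.Chars.lowerChar c == 'i') = false := by simpa using hi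
        rw [if_neg (by simp [hib]), cvtSpec_cons,
          show (PySem.Chars.lowerChar c == 'i' && !false && !alphaHead rest) = false by
            simp [hib]]
        simp only [Bool.false_eq_true, if_false, hc, if_true, List.map_cons, List.map_nil,
          List.cons_append, List.nil_append]
        congr 1
        rw [ih]
        exact cvtSpec_head_nonalpha false true rest hah
    | cons a b =>
      have hdwh := alphaHead_dropWhile rest
      have hsplit : (a :: b) ++ rest.dropWhile (fun x => PySem.Chars.isalpha x) = rest := by
        have h := List.takeWhile_append_dropWhile (p := fun x => PySem.Chars.isalpha x) (l := rest)
        rw [htw] at h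
        simpa using h
      have hmem : ∀ x ∈ a :: b, PySem.Chars.isalpha x = true := by
        intro x hx
        have hx' : x ∈ rest.takeWhile (fun x => PySem.Chars.isalpha x) := htw ▸ hx
        simpa using List.mem_takeWhile_imp hx'
      rw [if_neg (by simp)]
      have hall : ∀ x ∈ c :: a :: b, PySem.Chars.isalpha x = true := by
        intro x hx
        rcases List.mem_cons.mp hx with h | h
        · subst h; exact hc
        · exact hmem x h
      have hfirst : ∀ c' rest', (c :: a :: b) = c' :: rest' →
          (PySem.Chars.lowerChar c' == 'i' && !false
            && !alphaHead (rest' ++ rest.dropWhile (fun x => PySem.Chars.isalpha x))) = false := by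
        intro c' rest' heq
        injection heq with h1 h2
        subst h1; subst h2
        have ha : PySem.Chars.isalpha a = true := hmem a (by simp)
        simp [alphaHead, ha]
      have hrun := cvtSpec_run (c :: a :: b) (rest.dropWhile (fun x => PySem.Chars.isalpha x))
        false hall hdwh hfirst
      rw [show c :: rest = (c :: a :: b) ++ rest.dropWhile (fun x => PySem.Chars.isalpha x) from by
        rw [List.cons_append, hsplit]]
      rw [hrun, ih]
  | case3 c rest hc ih =>
    rw [altGo, if_neg hc]
    have hcb : PySem.Chars.isalpha c = false := by simpa using hc
    rw [cvtSpec_cons, lower_ne_i c hcb]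
    simp only [Bool.false_and, Bool.false_eq_true, if_false, hcb]
    rw [ih]

-- ===== VERDICT (by name: the statement is the Claim_ definition above) =====
theorem convert_expression_to_upper_spec : Claim_equal_convert_expression_to_upper := by
  intro s _
  unfold Spec_convert_expression_to_upper convert_expression_to_upper_alt
  rw [convA_eq, altGo_eq]
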